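-- pv_equiv track=rewrite | github.com/kotyara1005/2048 | py2048/model.py | tk
-- ===== SOURCE A (Python) =====
-- def tk(arr):
--     n = len(arr)
--     arr = [v for v in arr if v]
--     i = 0
--     while i < len(arr) - 1:
--         if arr[i] == arr[i + 1]:
--             arr[i:i + 2] = [arr[i] * 2]
--         i += 1
--     arr += [None] * (n - len(arr))
--     return arr
-- ===== SOURCE B (Python) =====
-- def tk(arr):
--     vals = [v for v in arr if v]
--     res = []
--     i = 0
--     while i < len(vals):
--         if i + 1 < len(vals) and vals[i] == vals[i + 1]:
--             res.append(vals[i] * 2)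
--             i += 2
--         else:
--             res.append(vals[i])
--             i += 1
--     return res + [None] * (len(arr) - len(res))
-- ===== Notes on version B (the rewrite author's own statement) =====
-- stated objective: faster
-- what changed: Replaces A's in-place while loop with slice-assignment mutation of the filtered list (each merge copies the tail) by a pure single forward pass with an explicit look-ahead index that appends merged/unmerged tiles to a fresh result list; the scanned list is never mutated.
import Mathlib
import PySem

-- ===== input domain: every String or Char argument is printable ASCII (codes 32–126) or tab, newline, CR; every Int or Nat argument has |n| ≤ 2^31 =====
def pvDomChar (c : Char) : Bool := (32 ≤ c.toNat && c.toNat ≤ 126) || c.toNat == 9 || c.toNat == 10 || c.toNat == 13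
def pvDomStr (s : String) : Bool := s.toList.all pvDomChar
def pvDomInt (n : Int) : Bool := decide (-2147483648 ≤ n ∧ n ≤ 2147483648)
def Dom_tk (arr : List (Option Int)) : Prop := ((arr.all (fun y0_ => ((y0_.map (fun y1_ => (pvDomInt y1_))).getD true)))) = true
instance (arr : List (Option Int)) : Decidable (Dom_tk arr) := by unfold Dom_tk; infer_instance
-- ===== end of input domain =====

-- ===== PORT A =====
-- One honest line: B rebuilds the merged row with a single forward look-ahead pass appending to
-- a fresh result list, instead of A's in-place while loop with slice assignment (A mutates only
-- a local copy, so the return value is the whole observable behaviour).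
def pyTruthy (v : Option Int) : Bool :=
  match v with
  | none => false
  | some x => x != 0

-- `while i < len(arr) - 1: if arr[i] == arr[i+1]: arr[i:i+2] = [arr[i]*2]; i += 1`
def tkLoop (arr : List (Option Int)) (i : Nat) : List (Option Int) :=
  if _h : i + 1 < arr.length then
    if arr.getD i none == arr.getD (i + 1) none then
      tkLoop (arr.take i ++ [(arr.getD i none).map (· * 2)] ++ arr.drop (i + 2)) (i + 1)
    else
      tkLoop arr (i + 1)
  else arr
termination_by arr.length - i
decreasing_by
  · simp [List.length_take]; omega
  · omega

def tk (arr : List (Option Int)) : List (Option Int) :=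
  let n := arr.length
  let filtered := arr.filter pyTruthy
  let merged := tkLoop filtered 0
  merged ++ List.replicate (n - merged.length) none

-- ===== PORT B =====
-- `while i < len(vals): ... res.append(...)` — one forward pass with a look-ahead index,
-- appending to a fresh result list `res`
def tkAltLoop (vals : List (Option Int)) (i : Nat) (res : List (Option Int)) :
    List (Option Int) :=
  if i < vals.length then
    if i + 1 < vals.length && vals.getD i none == vals.getD (i + 1) none then
      tkAltLoop vals (i + 2) (res ++ [(vals.getD i none).map (· * 2)])
    else
      tkAltLoop vals (i + 1) (res ++ [vals.getD i none])
  else res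
termination_by vals.length - i
decreasing_by all_goals omega

def tk_alt (arr : List (Option Int)) : List (Option Int) :=
  let vals := arr.filter pyTruthy
  let res := tkAltLoop vals 0 []
  res ++ List.replicate (arr.length - res.length) none

-- ===== PRECONDITION & SPEC =====
def Spec_tk (arr : List (Option Int)) (out : List (Option Int)) : Prop := out = tk_alt arr
instance (arr : List (Option Int)) (out : List (Option Int)) : Decidable (Spec_tk arr out) := by unfold Spec_tk; infer_instance

-- ===== CLAIM (what is proved, stated in full; the proofs are below) =====
def Claim_equal_tk : Prop := ∀ (arr : List (Option Int)), Dom_tk arr → Spec_tk arr (tk arr)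

-- ===== LEMMAS AND PROOFS =====

-- M: the functional merge both loops compute on the suffix still to be processed
def M : List (Option Int) → List (Option Int)
  | [] => []
  | [x] => [x]
  | x :: y :: rest =>
    if x == y then (x.map (· * 2)) :: M rest else x :: M (y :: rest)

theorem M_cons2 (x y : Option Int) (rest : List (Option Int)) :
    M (x :: y :: rest) = if x == y then (x.map (· * 2)) :: M rest else x :: M (y :: rest) := rfl

theorem M_short (xs : List (Option Int)) (h : xs.length ≤ 1) : M xs = xs := by
  match xs with
  | [] => rfl
  | [x] => rfl
  | x :: y :: rest => simp at h

theorem tkAltLoop_eq_M (vals : List (Option Int)) (i : Nat) (res : List (Option Int)) :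
    tkAltLoop vals i res = res ++ M (vals.drop i) := by
  unfold tkAltLoop
  split
  · rename_i h
    have hi : i < vals.length := h
    have hd : vals.drop i = vals[i] :: vals.drop (i + 1) := List.drop_eq_getElem_cons hi
    have hgi : vals.getD i none = vals[i] := List.getD_eq_getElem vals none hi
    split
    · rename_i hc
      simp only [Bool.and_eq_true, decide_eq_true_eq] at hc
      obtain ⟨hlt', heq⟩ := hc
      have hd2 : vals.drop (i + 1) = vals[i + 1] :: vals.drop (i + 2) :=
        List.drop_eq_getElem_cons hlt'
      have hg2 : vals.getD (i + 1) none = vals[i + 1] := List.getD_eq_getElem vals none hlt'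
      have heq' : vals[i] = vals[i + 1] := by
        rw [hgi, hg2] at heq; exact eq_of_beq heq
      rw [tkAltLoop_eq_M vals (i + 2), hd, hd2, M_cons2, if_pos (by simp [heq']), hgi]
      simp
    · rename_i hc
      simp only [Bool.and_eq_true, not_and, decide_eq_true_eq] at hc
      rw [tkAltLoop_eq_M vals (i + 1)]
      by_cases hlt' : i + 1 < vals.length
      · have hd2 : vals.drop (i + 1) = vals[i + 1] :: vals.drop (i + 2) :=
          List.drop_eq_getElem_cons hlt'
        have hg2 : vals.getD (i + 1) none = vals[i + 1] := List.getD_eq_getElem vals none hlt'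
        have hne : ¬ (vals[i] == vals[i + 1]) = true := by
          intro hco
          exact (hc hlt') (by rw [hgi, hg2]; exact hco)
        rw [hd, hd2, M_cons2, if_neg hne, ← hd2, hgi]
        simp
      · rw [hd, M_short (vals.drop (i + 1)) (by simp [List.length_drop]; omega),
            M_short (vals[i] :: vals.drop (i + 1)) (by simp [List.length_drop]; omega), hgi]
        simp
  · rename_i h
    rw [List.drop_eq_nil_of_le (by omega)]
    simp [M]
termination_by vals.length - i
decreasing_by all_goals omega

theorem tkLoop_eq_M (arr : List (Option Int)) (i : Nat) :
    tkLoop arr i = arr.take i ++ M (arr.drop i) := by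
  unfold tkLoop
  split
  · rename_i h
    have hi : i < arr.length := by omega
    have hd : arr.drop i = arr[i] :: arr.drop (i + 1) := List.drop_eq_getElem_cons hi
    have hd2 : arr.drop (i + 1) = arr[i + 1] :: arr.drop (i + 2) := List.drop_eq_getElem_cons h
    have hgi : arr.getD i none = arr[i] := List.getD_eq_getElem arr none hi
    have hg2 : arr.getD (i + 1) none = arr[i + 1] := List.getD_eq_getElem arr none h
    have htl : (arr.take i).length = i := List.length_take_of_le (by omega)
    split
    · rename_i heq
      have heq' : arr[i] = arr[i + 1] := by
        rw [hgi, hg2] at heq; exact eq_of_beq heq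
      rw [tkLoop_eq_M (arr.take i ++ [(arr.getD i none).map (· * 2)] ++ arr.drop (i + 2)) (i + 1)]
      have ht' : (arr.take i ++ [(arr.getD i none).map (· * 2)] ++ arr.drop (i + 2)).take (i + 1)
          = arr.take i ++ [(arr.getD i none).map (· * 2)] := by
        rw [List.append_assoc, List.take_append, htl,
            List.take_of_length_le (l := arr.take i) (by omega)]
        simp
      have hdrop' : (arr.take i ++ [(arr.getD i none).map (· * 2)] ++ arr.drop (i + 2)).drop (i + 1)
          = arr.drop (i + 2) := by
        rw [List.append_assoc, List.drop_append, htl,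
            List.drop_of_length_le (l := arr.take i) (by omega)]
        simp
      rw [ht', hdrop', hd, hd2, M_cons2, if_pos (by simp [heq']), hgi]
      simp
    · rename_i hne
      rw [tkLoop_eq_M arr (i + 1)]
      have ht : arr.take (i + 1) = arr.take i ++ [arr[i]] := by
        rw [List.take_add_one]
        simp [List.getElem?_eq_getElem hi]
      have hne' : ¬ (arr[i] == arr[i + 1]) = true := by
        intro hco
        exact hne (by rw [hgi, hg2]; exact hco)
      rw [hd, hd2, M_cons2, if_neg hne', ← hd2, ht]
      simp only [List.append_assoc, List.cons_append, List.nil_append]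
  · rename_i h
    rw [M_short (arr.drop i) (by simp [List.length_drop]; omega), List.take_append_drop]
termination_by arr.length - i
decreasing_by all_goals first | omega | (simp [List.length_take]; omega)

-- ===== VERDICT (by name: the statement is the Claim_ definition above) =====
theorem tk_spec : Claim_equal_tk := by
  intro arr _
  unfold Spec_tk tk tk_alt
  simp only [tkLoop_eq_M, tkAltLoop_eq_M, List.take_zero, List.drop_zero, List.nil_append]
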